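-- pv_equiv track=rewrite | github.com/Febbu/vosslab_podcast | pipeline/script_to_audio_say.py | resolve_voice_name
-- ===== SOURCE A (Python) =====
-- def resolve_voice_name(requested_voice: str, voices: list[str]) -> str:
-- 	"""
-- 	Resolve configured voice against installed voices.
-- 	"""
-- 	requested = requested_voice.strip()
-- 	if not requested:
-- 		return ""
-- 	for voice in voices:
-- 		if voice.lower() == requested.lower():
-- 			return voice
-- 	if requested.lower() == "siri":
-- 		for voice in voices:
-- 			if "siri" in voice.lower():
-- 				return voice
-- 		return ""
-- 	partial = [voice for voice in voices if requested.lower() in voice.lower()]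
-- 	if len(partial) == 1:
-- 		return partial[0]
-- 	if len(partial) > 1:
-- 		raise RuntimeError(
-- 			"Voice name is ambiguous: "
-- 			+ requested
-- 			+ ". Matches: "
-- 			+ ", ".join(partial[:8])
-- 		)
-- 	raise RuntimeError(
-- 		"Voice not found: "
-- 		+ requested
-- 		+ ". Use --list-voices to inspect installed names."
-- 	)
-- ===== SOURCE B (Python) =====
-- def resolve_voice_name(requested_voice: str, voices: list[str]) -> str:
-- 	"""
-- 	Resolve configured voice against installed voices (single pass over voices).
-- 	"""
-- 	requested = requested_voice.strip()
-- 	if not requested: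
-- 		return ""
-- 	req = requested.lower()
-- 	exact = None
-- 	partial = []
-- 	for voice in voices:
-- 		lv = voice.lower()
-- 		if exact is None and lv == req:
-- 			exact = voice
-- 		if req in lv:
-- 			partial.append(voice)
-- 	if exact is not None:
-- 		return exact
-- 	if req == "siri":
-- 		return partial[0] if partial else ""
-- 	if len(partial) == 1:
-- 		return partial[0]
-- 	if len(partial) > 1:
-- 		raise RuntimeError(
-- 			"Voice name is ambiguous: "
-- 			+ requested
-- 			+ ". Matches: "
-- 			+ ", ".join(partial[:8])
-- 		)
-- 	raise RuntimeError(
-- 		"Voice not found: "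
-- 		+ requested
-- 		+ ". Use --list-voices to inspect installed names."
-- 	)
-- ===== Notes on version B (the rewrite author's own statement) =====
-- stated objective: alternative
-- what changed: A scans voices up to three times (exact loop, siri loop, partial comprehension); B resolves in one pass that records the first exact match and accumulates partial matches, then branches once after the loop (fewer scans, not measured).
-- outside the precondition, e.g. on resolve_voice_name('Zed', ['Alex', 'Fred']): A raises RuntimeError, B raises RuntimeError; on resolve_voice_name('a', ['Alex', 'Samantha']): A raises RuntimeError, B raises RuntimeError
import Mathlib
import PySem

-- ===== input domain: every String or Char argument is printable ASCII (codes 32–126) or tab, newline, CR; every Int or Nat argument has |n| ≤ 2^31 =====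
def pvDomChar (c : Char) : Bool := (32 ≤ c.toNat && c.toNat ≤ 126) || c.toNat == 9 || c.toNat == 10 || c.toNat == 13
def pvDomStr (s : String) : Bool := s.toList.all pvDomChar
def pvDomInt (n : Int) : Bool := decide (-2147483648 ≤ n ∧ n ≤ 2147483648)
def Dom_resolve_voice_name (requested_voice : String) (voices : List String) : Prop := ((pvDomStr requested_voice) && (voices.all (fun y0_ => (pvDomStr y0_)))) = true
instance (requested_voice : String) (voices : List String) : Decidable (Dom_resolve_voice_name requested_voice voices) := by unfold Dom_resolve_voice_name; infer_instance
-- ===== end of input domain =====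

-- B replaces A's three scans over voices (exact loop, siri loop, partial comprehension)
-- by ONE pass that records the first exact match and accumulates the partial matches.
-- Equivalence is about the RETURN value on Pre_ (where A returns; A raises outside Pre_).

-- ===== PORT A =====
-- first loop of A: first voice with voice.lower() == requested.lower()
def pvA_exactLoop (requested : String) : List String → Option String
  | [] => none
  | v :: rest =>
    if PySem.Str.lower v = PySem.Str.lower requested then some v
    else pvA_exactLoop requested rest

-- siri loop of A: first voice with "siri" in voice.lower()
def pvA_siriLoop : List String → Option String
  | [] => none
  | v :: rest =>
    if PySem.Str.isIn "siri" (PySem.Str.lower v) then some v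
    else pvA_siriLoop rest

def resolve_voice_name (requested_voice : String) (voices : List String) : String :=
  let requested := PySem.Str.strip requested_voice
  if requested = "" then ""
  else
    match pvA_exactLoop requested voices with
    | some v => v
    | none =>
      if PySem.Str.lower requested = "siri" then
        match pvA_siriLoop voices with
        | some v => v
        | none => ""
      else
        let part := voices.filter
          (fun v => PySem.Str.isIn (PySem.Str.lower requested) (PySem.Str.lower v))
        if part.length = 1 then part.headD ""
        else ""  -- A raises RuntimeError here (ambiguous / not found); excluded by Pre_

-- ===== PORT B =====
-- one pass: state = (first exact match so far, partial matches so far)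
def pvB_loop (req : String) : List String → Option String → List String → Option String × List String
  | [], exact, part => (exact, part)
  | v :: rest, exact, part =>
    let lv := PySem.Str.lower v
    let exact' := if exact = none ∧ lv = req then some v else exact
    let part' := if PySem.Str.isIn req lv then part ++ [v] else part
    pvB_loop req rest exact' part'

def resolve_voice_name_alt (requested_voice : String) (voices : List String) : String :=
  let requested := PySem.Str.strip requested_voice
  if requested = "" then ""
  else
    let req := PySem.Str.lower requested
    match pvB_loop req voices none [] with
    | (some v, _) => v
    | (none, part) =>
      if req = "siri" then part.headD ""
      else if part.length = 1 then part.headD ""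
      else ""  -- B raises RuntimeError here, same messages as A; excluded by Pre_

-- ===== PRECONDITION & SPEC =====
-- Pre_ excludes exactly the inputs on which A raises RuntimeError (no exact match,
-- requested is not "siri"/blank, and the number of partial matches is ≠ 1).
def Pre_resolve_voice_name (requested_voice : String) (voices : List String) : Prop :=
  PySem.Str.strip requested_voice = "" ∨
  (∃ v ∈ voices, PySem.Str.lower v = PySem.Str.lower (PySem.Str.strip requested_voice)) ∨
  PySem.Str.lower (PySem.Str.strip requested_voice) = "siri" ∨
  (voices.filter (fun v => PySem.Str.isIn (PySem.Str.lower (PySem.Str.strip requested_voice)) (PySem.Str.lower v))).length = 1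

instance (requested_voice : String) (voices : List String) : Decidable (Pre_resolve_voice_name requested_voice voices) := by
  unfold Pre_resolve_voice_name; infer_instance

def pvWitness_resolve_voice_name : String × List String := (" Alex ", ["Fred", "Alex"])

def Spec_resolve_voice_name (requested_voice : String) (voices : List String) (out : String) : Prop := out = resolve_voice_name_alt requested_voice voices
instance (requested_voice : String) (voices : List String) (out : String) : Decidable (Spec_resolve_voice_name requested_voice voices out) := by unfold Spec_resolve_voice_name; infer_instance

-- ===== CLAIM (what is proved, stated in full; the proofs are below) =====
def Claim_equal_resolve_voice_name : Prop := ∀ (requested_voice : String) (voices : List String), Dom_resolve_voice_name requested_voice voices → Pre_resolve_voice_name requested_voice voices → Spec_resolve_voice_name requested_voice voices (resolve_voice_name requested_voice voices)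

-- ===== LEMMAS AND PROOFS =====

-- B's single pass computes (first exact match, accumulated partial matches)
theorem pvB_loop_eq (req : String) (vs : List String) (exact : Option String) (part : List String) :
    pvB_loop req vs exact part =
      ((exact.orElse (fun _ => vs.find? (fun v => PySem.Str.lower v == req))),
       part ++ vs.filter (fun v => PySem.Str.isIn req (PySem.Str.lower v))) := by
  induction vs generalizing exact part with
  | nil => cases exact <;> simp [pvB_loop, Option.orElse]
  | cons v rest ih =>
    by_cases h : PySem.Str.lower v = req
    · cases hc : PySem.Chars.isIn req.toList req.toList <;> cases exact <;>
        simp [pvB_loop, ih, List.find?, List.filter, h, hc, Option.orElse]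
    · have hb : (PySem.Str.lower v == req) = false := beq_eq_false_iff_ne.mpr h
      cases hc : PySem.Chars.isIn req.toList (PySem.Chars.lower v.toList) <;> cases exact <;>
        simp [pvB_loop, ih, List.find?, List.filter, h, hb, hc, Option.orElse]

-- A's exact loop is find?
theorem pvA_exactLoop_eq (requested : String) (vs : List String) :
    pvA_exactLoop requested vs =
      vs.find? (fun v => PySem.Str.lower v == PySem.Str.lower requested) := by
  induction vs with
  | nil => rfl
  | cons v rest ih =>
    by_cases h : PySem.Str.lower v = PySem.Str.lower requested
    · simp [pvA_exactLoop, List.find?, h]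
    · have hb : (PySem.Str.lower v == PySem.Str.lower requested) = false := beq_eq_false_iff_ne.mpr h
      simp [pvA_exactLoop, List.find?, h, hb, ih]

-- A's siri loop is find? of the containment predicate
-- the Option match 'match o with | some v => v | none => ""' applied to head?
theorem pvHeadMatch (l : List String) :
    (match l.head? with | some v => v | none => "") = l.headD "" := by
  cases l <;> rfl

theorem pvA_siriLoop_eq (vs : List String) :
    pvA_siriLoop vs = vs.find? (fun v => PySem.Str.isIn "siri" (PySem.Str.lower v)) := by
  induction vs with
  | nil => rfl
  | cons v rest ih =>
    cases h : PySem.Chars.isIn ['s','i','r','i'] (PySem.Chars.lower v.toList) <;>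
      simp [pvA_siriLoop, List.find?, h, ih]

theorem find?_eq_head?_filter {α : Type} (p : α → Bool) (l : List α) :
    l.find? p = (l.filter p).head? := by
  induction l with
  | nil => rfl
  | cons a t ih =>
    cases h : p a <;> simp only [List.find?, List.filter, h, ih, List.head?]

-- ===== VERDICT (by name: the statement is the Claim_ definition above) =====
theorem resolve_voice_name_spec : Claim_equal_resolve_voice_name := by
  intro rv voices _ _
  unfold Spec_resolve_voice_name resolve_voice_name resolve_voice_name_alt
  by_cases h0 : PySem.Str.strip rv = ""
  · rw [if_pos h0, if_pos h0]
  · rw [if_neg h0, if_neg h0]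
    simp only [pvB_loop_eq, pvA_exactLoop_eq, pvA_siriLoop_eq, List.nil_append, Option.orElse]
    cases hfind : List.find? (fun v => PySem.Str.lower v == PySem.Str.lower (PySem.Str.strip rv)) voices with
    | some w => rfl
    | none =>
      by_cases hsiri : PySem.Str.lower (PySem.Str.strip rv) = "siri"
      · rw [hsiri]
        show (match List.find? (fun v => PySem.Str.isIn "siri" (PySem.Str.lower v)) voices with
              | some v => v | none => "") =
             (List.filter (fun v => PySem.Str.isIn "siri" (PySem.Str.lower v)) voices).headD ""
        rw [find?_eq_head?_filter]
        exact pvHeadMatch _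
      · simp [hsiri]
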